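-- pv_equiv track=rewrite | github.com/WangNe2207/YOLOv1 | YOLOv1/main.py | annotationConverting
-- ===== SOURCE A (Python) =====
-- def annotationConverting(dataset):
--     X, Y = [], []
--     for item in dataset:
--         item = item.replace("\n", "").split(" ")
--         X.append(item[0])
--         arr = []
--         for i in range(1, len(item)):
--             arr.append(item[i])
--         Y.append(arr)
--     return X,Y
-- ===== SOURCE B (Python) =====
-- def annotationConverting(dataset):
--     # Character-level state machine: one pass over each line's characters,
--     # dropping '\n' and cutting tokens at ' ' on the fly (no replace/split calls).
--     X, Y = [], []
--     for line in dataset: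
--         tokens, cur = [], []
--         for ch in line:
--             if ch == "\n":
--                 continue
--             if ch == " ":
--                 tokens.append("".join(cur))
--                 cur = []
--             else:
--                 cur.append(ch)
--         tokens.append("".join(cur))
--         X.append(tokens[0])
--         Y.append(tokens[1:])
--     return X, Y
-- ===== Notes on version B (the rewrite author's own statement) =====
-- stated objective: alternative
-- what changed: Replaces A's per-line replace("\n","")+split(" ") library passes (plus an index loop copying the tail) with a single character-level state machine per line that drops newlines and cuts tokens at spaces on the fly.
import Mathlib
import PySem

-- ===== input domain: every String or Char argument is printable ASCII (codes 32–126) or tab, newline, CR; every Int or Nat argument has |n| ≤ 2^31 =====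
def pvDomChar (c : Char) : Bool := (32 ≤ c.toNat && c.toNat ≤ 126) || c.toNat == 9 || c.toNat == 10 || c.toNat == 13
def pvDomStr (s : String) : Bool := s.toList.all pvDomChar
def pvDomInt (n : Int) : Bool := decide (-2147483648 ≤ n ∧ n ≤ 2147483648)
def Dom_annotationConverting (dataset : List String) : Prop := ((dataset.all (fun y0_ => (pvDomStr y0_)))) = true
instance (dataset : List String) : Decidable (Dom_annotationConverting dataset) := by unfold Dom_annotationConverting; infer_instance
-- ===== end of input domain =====

-- B replaces A's per-line replace("\n","")+split(" ") library passes with a single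
-- character-level state machine that drops '\n' and cuts tokens at ' ' on the fly (alternative, same cost).
-- ===== PORT A =====
def annotationConverting (dataset : List String) : List String × List (List String) :=
  dataset.foldl (fun acc line =>
    let item := ((PySem.Str.split? (PySem.Str.replace line "\n" "") " ").getD [])
    let arr := (PySem.List.pyRange 1 (item.length : Int) 1).foldl
      (fun a i => a ++ [PySem.List.pyGetD item i ""]) ([] : List String)
    (acc.1 ++ [PySem.List.pyGetD item 0 ""], acc.2 ++ [arr])) ([], [])

-- ===== PORT B =====
-- per-line character scanner: state (finished tokens, current token's chars)
def annotationConverting_alt (dataset : List String) : List String × List (List String) :=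
  dataset.foldl (fun acc line =>
    let p := line.toList.foldl (fun (st : List String × List Char) ch =>
        if ch == '\n' then st
        else if ch == ' ' then (st.1 ++ [String.ofList st.2], ([] : List Char))
        else (st.1, st.2 ++ [ch])) (([] : List String), ([] : List Char))
    let tokens := p.1 ++ [String.ofList p.2]
    (acc.1 ++ [PySem.List.pyGetD tokens 0 ""], acc.2 ++ [PySem.List.slice tokens (some 1) none])) ([], [])

-- ===== PRECONDITION & SPEC =====
def Spec_annotationConverting (dataset : List String) (out : List String × List (List String)) : Prop := out = annotationConverting_alt dataset
instance (dataset : List String) (out : List String × List (List String)) : Decidable (Spec_annotationConverting dataset out) := by unfold Spec_annotationConverting; infer_instance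

-- ===== CLAIM (what is proved, stated in full; the proofs are below) =====
def Claim_equal_annotationConverting : Prop := ∀ (dataset : List String), Dom_annotationConverting dataset → Spec_annotationConverting dataset (annotationConverting dataset)

-- ===== LEMMAS AND PROOFS =====

-- abstract single-char space scanner (proof device relating both ports)
def pvScan : List Char → List Char → List (List Char)
  | [], cur => [cur]
  | c :: t, cur => if c = ' ' then cur :: pvScan t [] else pvScan t (cur ++ [c])

-- replace("\n","") is a character filter
lemma pv_replace_go (fuel : Nat) (cs acc : List Char) (h : cs.length ≤ fuel) :
    PySem.Chars.replace.go ['\n'] [] fuel cs acc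
      = acc.reverse ++ cs.filter (fun c => !(c == '\n')) := by
  induction fuel generalizing cs acc with
  | zero =>
      cases cs with
      | nil => simp [PySem.Chars.replace.go]
      | cons c t => simp at h
  | succ n ih =>
      cases cs with
      | nil => simp [PySem.Chars.replace.go]
      | cons c t =>
          rw [PySem.Chars.replace.go]
          by_cases hc : c = '\n'
          · subst hc
            have hp : (['\n'].isPrefixOf ('\n' :: t)) = true := by
              simp [List.isPrefixOf]
            rw [if_pos hp]
            simp only [List.length_singleton, List.drop_succ_cons, List.drop_zero,
              List.reverse_nil, List.nil_append]
            rw [ih t acc (by simpa using h)]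
            simp
          · rw [if_neg (by simp [List.isPrefixOf]; intro h'; exact absurd h'.symm hc)]
            rw [ih t (c :: acc) (by simpa using h)]
            simp [hc]

-- split(" ") is the single-char scanner
lemma pv_split_go (fuel : Nat) (cs cur : List Char) (acc : List (List Char)) (h : cs.length ≤ fuel) :
    PySem.Chars.splitOn.go [' '] fuel cs cur acc
      = acc.reverse ++ pvScan cs cur.reverse := by
  induction fuel generalizing cs cur acc with
  | zero =>
      cases cs with
      | nil => simp [PySem.Chars.splitOn.go, pvScan]
      | cons c t => simp at h
  | succ n ih =>
      cases cs with
      | nil => simp [PySem.Chars.splitOn.go, pvScan]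
      | cons c t =>
          rw [PySem.Chars.splitOn.go]
          by_cases hc : c = ' '
          · subst hc
            have hp : ([' '].isPrefixOf (' ' :: t)) = true := by
              simp [List.isPrefixOf]
            rw [if_pos hp]
            simp only [List.length_singleton, List.drop_succ_cons, List.drop_zero]
            rw [ih t [] (cur.reverse :: acc) (by simpa using h)]
            simp [pvScan]
          · rw [if_neg (by simp [List.isPrefixOf]; intro h'; exact absurd h'.symm hc)]
            rw [ih t (c :: cur) acc (by simpa using h)]
            simp [pvScan, hc]

-- A's per-line tokenisation in scanner form
lemma pv_item_eq (line : String) :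
    ((PySem.Str.split? (PySem.Str.replace line "\n" "") " ").getD [])
      = (pvScan (line.toList.filter (fun c => !(c == '\n'))) []).map String.ofList := by
  have h1 : PySem.Str.replace line "\n" ""
      = String.ofList (line.toList.filter (fun c => !(c == '\n'))) := by
    simp only [PySem.Str.replace]
    congr 1
    show PySem.Chars.replace line.toList ['\n'] [] = _
    rw [PySem.Chars.replace, if_neg (by simp)]
    simpa using pv_replace_go line.toList.length line.toList [] le_rfl
  rw [h1]
  simp only [PySem.Str.split?, PySem.Chars.split?, String.toList_ofList]
  rw [if_neg (by simp : ¬ ((" " : String).toList.isEmpty = true))]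
  show ((some (List.map String.ofList
      (PySem.Chars.splitOn (line.toList.filter (fun c => !(c == '\n'))) (" " : String).toList))).getD []) = _
  rw [PySem.Chars.splitOn]
  have : ((" " : String).toList) = [' '] := by simp
  rw [this]
  rw [pv_split_go _ _ [] [] (by omega)]
  simp

-- B's per-line fold in scanner form
lemma pv_bscan (cs : List Char) (toks : List String) (cur : List Char) :
    (cs.foldl (fun (st : List String × List Char) ch =>
        if ch == '\n' then st
        else if ch == ' ' then (st.1 ++ [String.ofList st.2], ([] : List Char))
        else (st.1, st.2 ++ [ch])) (toks, cur)).1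
      ++ [String.ofList ((cs.foldl (fun (st : List String × List Char) ch =>
        if ch == '\n' then st
        else if ch == ' ' then (st.1 ++ [String.ofList st.2], ([] : List Char))
        else (st.1, st.2 ++ [ch])) (toks, cur)).2)]
      = toks ++ (pvScan (cs.filter (fun c => !(c == '\n'))) cur).map String.ofList := by
  induction cs generalizing toks cur with
  | nil => simp [pvScan]
  | cons c t ih =>
      simp only [List.foldl_cons]
      by_cases h1 : c = '\n'
      · subst h1
        rw [if_pos (by decide)]
        rw [ih toks cur]
        simp
      · rw [if_neg (by simp [h1])]
        by_cases h2 : c = ' '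
        · subst h2
          rw [if_pos (by decide)]
          rw [ih (toks ++ [String.ofList cur]) []]
          simp [pvScan]
        · rw [if_neg (by simp [h2])]
          rw [ih toks (cur ++ [c])]
          simp [pvScan, h1, h2]

-- A's inner index loop is the tail slice
lemma pv_arr_eq (item : List String) :
    (PySem.List.pyRange 1 (item.length : Int) 1).foldl
      (fun a i => a ++ [PySem.List.pyGetD item i ""]) ([] : List String)
    = PySem.List.slice item (some 1) none := by
  rw [PySem.List.foldl_pyRange_pyGetD' item "" (fun a v => a ++ [v]) [] (by omega),
      PySem.List.slice_from_one]
  cases item with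
  | nil => simp
  | cons h t =>
      simp only [List.tail_cons]
      induction t with
      | nil => simp
      | cons h2 t2 ih2 => simp_all

theorem annotationConverting_spec : Claim_equal_annotationConverting := by
  intro dataset _
  unfold Spec_annotationConverting annotationConverting annotationConverting_alt
  have hstep : (fun (acc : List String × List (List String)) (line : String) =>
      let item := ((PySem.Str.split? (PySem.Str.replace line "\n" "") " ").getD [])
      let arr := (PySem.List.pyRange 1 (item.length : Int) 1).foldl
        (fun a i => a ++ [PySem.List.pyGetD item i ""]) ([] : List String)
      (acc.1 ++ [PySem.List.pyGetD item 0 ""], acc.2 ++ [arr]))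
    = (fun (acc : List String × List (List String)) (line : String) =>
      let p := line.toList.foldl (fun (st : List String × List Char) ch =>
          if ch == '\n' then st
          else if ch == ' ' then (st.1 ++ [String.ofList st.2], ([] : List Char))
          else (st.1, st.2 ++ [ch])) (([] : List String), ([] : List Char))
      let tokens := p.1 ++ [String.ofList p.2]
      (acc.1 ++ [PySem.List.pyGetD tokens 0 ""], acc.2 ++ [PySem.List.slice tokens (some 1) none])) := by
    funext acc line
    dsimp only
    have hb := pv_bscan line.toList [] []
    simp only [List.nil_append] at hb
    rw [pv_item_eq line, pv_arr_eq, ← hb]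
  rw [hstep]
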